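-- pv_equiv track=rewrite | github.com/dyoon17/BOJ_python_algorithm2 | tiling2.py | tiling_with_2x2
-- ===== SOURCE A (Python) =====
-- def tiling_with_2x2(n):      # 초기값 설정
--     if n == 1:
--         return 1
--     if n == 2:
--         return 3
--
--     prev2, prev1 = 1, 3  # dp[1] = 1, dp[2] = 3      # 변수 초기화 (공간 최적화)
--
--     # Bottom-Up 방식으로 계산
--     for i in range(3, n + 1):
--         current = (prev1 + 2 * prev2) % 10007
--         prev2, prev1 = prev1, current
--
--     return prev1
-- ===== SOURCE B (Python) =====
-- def tiling_with_2x2(n):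
--     MOD = 10007
--     if n == 1:
--         return 1
--     if n <= 2:
--         return 3
--     # f(k) = f(k-1) + 2*f(k-2) (mod 10007), f(1)=1, f(2)=3; computed via fast
--     # exponentiation (repeated squaring) of the companion matrix [[1,2],[1,0]].
--     def mul(A, B):
--         a, b, c, d = A
--         e, f, g, h = B
--         return ((a * e + b * g) % MOD, (a * f + b * h) % MOD,
--                 (c * e + d * g) % MOD, (c * f + d * h) % MOD)
--     def mpow(e):
--         if e == 0:
--             return (1, 0, 0, 1)
--         half = mpow(e >> 1)
--         s = mul(half, half)
--         return mul((1, 2, 1, 0), s) if e & 1 else s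
--     a, b, _, _ = mpow(n - 2)
--     return (a * 3 + b) % MOD
-- ===== Notes on version B (the rewrite author's own statement) =====
-- stated objective: faster
-- what changed: Replaces the linear bottom-up DP loop by fast exponentiation (repeated squaring) of the 2x2 companion matrix of the recurrence mod 10007.
import Mathlib
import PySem

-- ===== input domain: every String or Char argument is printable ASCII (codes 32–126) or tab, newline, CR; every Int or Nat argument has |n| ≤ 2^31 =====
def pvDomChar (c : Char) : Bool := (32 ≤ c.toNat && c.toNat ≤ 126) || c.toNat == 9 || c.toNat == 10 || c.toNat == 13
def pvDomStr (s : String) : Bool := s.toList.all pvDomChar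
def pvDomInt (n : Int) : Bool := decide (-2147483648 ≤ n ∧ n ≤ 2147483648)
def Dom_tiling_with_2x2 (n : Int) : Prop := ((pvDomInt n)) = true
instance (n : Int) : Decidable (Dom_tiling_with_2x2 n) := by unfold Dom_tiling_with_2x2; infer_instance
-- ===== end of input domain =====

-- B replaces A's bottom-up loop by repeated squaring of the 2x2 companion matrix of the recurrence mod 10007; the return values agree on every Int.

-- ===== PORT A =====
def tiling_with_2x2 (n : Int) : Int :=
  if n = 1 then 1
  else if n = 2 then 3
  else
    -- for i in range(3, n+1): current = (prev1 + 2*prev2) % 10007; prev2, prev1 = prev1, current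
    let st := (PySem.List.pyRange 3 (n + 1) 1).foldl
      (fun (p : Int × Int) _ => (p.2, PySem.Int.mod (p.2 + 2 * p.1) 10007)) (1, 3)
    st.2

-- ===== PORT B =====
-- 2x2 matrix as (a, b, c, d), row-major; entries reduced mod 10007 (Python's mul helper)
def pvMmul (A B : Int × Int × Int × Int) : Int × Int × Int × Int :=
  (PySem.Int.mod (A.1 * B.1 + A.2.1 * B.2.2.1) 10007,
   PySem.Int.mod (A.1 * B.2.1 + A.2.1 * B.2.2.2) 10007,
   PySem.Int.mod (A.2.2.1 * B.1 + A.2.2.2 * B.2.2.1) 10007,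
   PySem.Int.mod (A.2.2.1 * B.2.1 + A.2.2.2 * B.2.2.2) 10007)

-- Python's mpow: recursion on e >> 1 with squaring; e & 1 decides the extra factor
def pvMpow : Nat → Int × Int × Int × Int
  | 0 => (1, 0, 0, 1)
  | e + 1 =>
    let half := pvMpow ((e + 1) / 2)
    let s := pvMmul half half
    if (e + 1) % 2 = 1 then pvMmul (1, 2, 1, 0) s else s
decreasing_by exact Nat.div_lt_self (Nat.succ_pos e) (by norm_num)

def tiling_with_2x2_alt (n : Int) : Int :=
  if n = 1 then 1
  else if n ≤ 2 then 3
  else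
    let M := pvMpow (n - 2).toNat
    PySem.Int.mod (M.1 * 3 + M.2.1) 10007

-- ===== PRECONDITION & SPEC =====
def Spec_tiling_with_2x2 (n : Int) (out : Int) : Prop := out = tiling_with_2x2_alt n
instance (n : Int) (out : Int) : Decidable (Spec_tiling_with_2x2 n out) := by unfold Spec_tiling_with_2x2; infer_instance

-- ===== CLAIM (what is proved, stated in full; the proofs are below) =====
def Claim_equal_tiling_with_2x2 : Prop := ∀ (n : Int), Dom_tiling_with_2x2 n → Spec_tiling_with_2x2 n (tiling_with_2x2 n)

-- ===== LEMMAS AND PROOFS =====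

-- one iteration of A's loop body
def pvStep (p : Int × Int) : Int × Int := (p.2, PySem.Int.mod (p.2 + 2 * p.1) 10007)

-- the same matrix algebra over ZMod 10007, where mod-arithmetic is the ring structure
def pvZmul (A B : ZMod 10007 × ZMod 10007 × ZMod 10007 × ZMod 10007) :
    ZMod 10007 × ZMod 10007 × ZMod 10007 × ZMod 10007 :=
  (A.1 * B.1 + A.2.1 * B.2.2.1, A.1 * B.2.1 + A.2.1 * B.2.2.2,
   A.2.2.1 * B.1 + A.2.2.2 * B.2.2.1, A.2.2.1 * B.2.1 + A.2.2.2 * B.2.2.2)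

-- linear (one-factor-at-a-time) matrix power, the reference both ports are compared with
def pvZpow : Nat → ZMod 10007 × ZMod 10007 × ZMod 10007 × ZMod 10007
  | 0 => (1, 0, 0, 1)
  | k + 1 => pvZmul (1, 2, 1, 0) (pvZpow k)

-- the recurrence state over ZMod 10007: pvZp k = (f (k+1), f (k+2))
def pvZp : Nat → ZMod 10007 × ZMod 10007
  | 0 => (1, 3)
  | k + 1 => ((pvZp k).2, (pvZp k).2 + 2 * (pvZp k).1)

def pvCastM (A : Int × Int × Int × Int) :
    ZMod 10007 × ZMod 10007 × ZMod 10007 × ZMod 10007 :=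
  ((A.1 : ZMod 10007), (A.2.1 : ZMod 10007), (A.2.2.1 : ZMod 10007), (A.2.2.2 : ZMod 10007))

def pvCastP (p : Int × Int) : ZMod 10007 × ZMod 10007 := ((p.1 : ZMod 10007), (p.2 : ZMod 10007))

theorem pv_cast_mod (x : Int) : ((PySem.Int.mod x 10007 : Int) : ZMod 10007) = (x : ZMod 10007) := by
  rw [PySem.Int.mod_eq_emod_of_pos (by norm_num)]
  exact_mod_cast ZMod.intCast_mod x 10007

theorem pv_castM_mmul (A B : Int × Int × Int × Int) :
    pvCastM (pvMmul A B) = pvZmul (pvCastM A) (pvCastM B) := by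
  simp only [pvMmul, pvZmul, pvCastM, Prod.mk.injEq]
  refine ⟨?_, ?_, ?_, ?_⟩ <;> rw [pv_cast_mod] <;> push_cast <;> ring

theorem pv_zmul_assoc (A B C : ZMod 10007 × ZMod 10007 × ZMod 10007 × ZMod 10007) :
    pvZmul (pvZmul A B) C = pvZmul A (pvZmul B C) := by
  simp only [pvZmul, Prod.mk.injEq]
  refine ⟨by ring, by ring, by ring, by ring⟩

theorem pv_zmul_one_left (A : ZMod 10007 × ZMod 10007 × ZMod 10007 × ZMod 10007) :
    pvZmul (1, 0, 0, 1) A = A := by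
  simp [pvZmul]

theorem pv_zpow_add (a b : Nat) : pvZpow (a + b) = pvZmul (pvZpow a) (pvZpow b) := by
  induction a with
  | zero => simp [pvZpow, pv_zmul_one_left]
  | succ a ih =>
    rw [Nat.succ_add]
    show pvZmul (1,2,1,0) (pvZpow (a + b)) = _
    rw [ih, ← pv_zmul_assoc]
    rfl

-- the binary power of port B computes the linear power
theorem pv_castM_mpow (e : Nat) : pvCastM (pvMpow e) = pvZpow e := by
  induction e using Nat.strong_induction_on with
  | _ e ih =>
    match e with
    | 0 => simp [pvMpow, pvCastM, pvZpow]
    | e + 1 =>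
      have hq : (e + 1) / 2 < e + 1 := Nat.div_lt_self (Nat.succ_pos e) (by norm_num)
      have ihq := ih _ hq
      rw [pvMpow]
      by_cases h : (e + 1) % 2 = 1
      · have he : 1 + ((e + 1) / 2 + (e + 1) / 2) = e + 1 := by omega
        simp only [h, if_true]
        rw [pv_castM_mmul, pv_castM_mmul, ihq, ← pv_zpow_add]
        have hM : pvCastM (1, 2, 1, 0) = pvZmul (1,2,1,0) (pvZpow 0) := by
          simp [pvCastM, pvZmul, pvZpow]
        rw [hM]
        show pvZmul (pvZpow 1) _ = _
        rw [← pv_zpow_add, he]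
      · have he : (e + 1) / 2 + (e + 1) / 2 = e + 1 := by omega
        simp only [h, if_false]
        rw [pv_castM_mmul, ihq, ← pv_zpow_add, he]

-- A's iterated loop body computes the recurrence state
theorem pv_cast_iter (k : Nat) : pvCastP (pvStep^[k] (1, 3)) = pvZp k := by
  induction k with
  | zero => simp [pvCastP, pvZp]
  | succ k ih =>
    rw [Function.iterate_succ_apply', pvZp]
    simp only [pvStep, pvCastP, pv_cast_mod] at *
    rw [← ih]
    push_cast
    ring_nf

-- applying the linear power to the start vector (3, 1) yields the recurrence state
theorem pv_vec (k : Nat) :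
    (pvZpow k).1 * 3 + (pvZpow k).2.1 = (pvZp k).2 ∧
    (pvZpow k).2.2.1 * 3 + (pvZpow k).2.2.2 = (pvZp k).1 := by
  induction k with
  | zero => simp [pvZpow, pvZp]
  | succ k ih =>
    simp only [pvZpow, pvZp, pvZmul]
    constructor
    · rw [show (1:ZMod 10007) * (pvZpow k).1 + 2 * (pvZpow k).2.2.1 = (pvZpow k).1 + 2 * (pvZpow k).2.2.1 by ring]
      rw [← ih.1, ← ih.2]; ring
    · rw [← ih.1]; ring

theorem pv_mod_bounds (x : Int) : 0 ≤ PySem.Int.mod x 10007 ∧ PySem.Int.mod x 10007 < 10007 := by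
  rw [PySem.Int.mod_eq_emod_of_pos (by norm_num)]
  exact ⟨Int.emod_nonneg x (by norm_num), Int.emod_lt_of_pos x (by norm_num)⟩

theorem pv_eq_of_cast_eq (x y : Int) (hx : 0 ≤ x) (hx' : x < 10007) (hy : 0 ≤ y) (hy' : y < 10007)
    (h : (x : ZMod 10007) = (y : ZMod 10007)) : x = y := by
  have := (ZMod.intCast_eq_intCast_iff' x y 10007).mp h
  omega

theorem pv_foldl_iterate {α β : Type} (l : List α) (f : β → β) (init : β) :
    l.foldl (fun p _ => f p) init = f^[l.length] init := by
  induction l generalizing init with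
  | nil => rfl
  | cons a l ih => simp [List.foldl, ih, Function.iterate_succ_apply]

-- ===== VERDICT (by name: the statement is the Claim_ definition above) =====
theorem tiling_with_2x2_spec : Claim_equal_tiling_with_2x2 := by
  intro n _
  unfold Spec_tiling_with_2x2 tiling_with_2x2 tiling_with_2x2_alt
  by_cases h1 : n = 1
  · simp [h1]
  by_cases h2 : n ≤ 2
  · by_cases h3 : n = 2
    · simp [h3]
    · have hnil : PySem.List.pyRange 3 (n + 1) 1 = [] :=
        PySem.List.pyRange_one_eq_nil (by omega)
      rw [if_neg h1, if_neg h3, if_neg h1, if_pos h2, hnil]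
      rfl
  · have h3 : ¬ n = 2 := by omega
    rw [if_neg h1, if_neg h3, if_neg h1, if_neg h2]
    have hfun : (fun (p : Int × Int) (_ : Int) => (p.2, PySem.Int.mod (p.2 + 2 * p.1) 10007))
        = (fun p _ => pvStep p) := rfl
    have hlen : (PySem.List.pyRange 3 (n + 1) 1).length = (n - 2).toNat := by
      rw [PySem.List.length_pyRange_one]; omega
    show ((PySem.List.pyRange 3 (n + 1) 1).foldl
        (fun (p : Int × Int) _ => (p.2, PySem.Int.mod (p.2 + 2 * p.1) 10007)) (1, 3)).2
      = PySem.Int.mod ((pvMpow (n - 2).toNat).1 * 3 + (pvMpow (n - 2).toNat).2.1) 10007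
    rw [hfun, pv_foldl_iterate, hlen]
    set k := (n - 2).toNat with hkdef
    obtain ⟨j, hj⟩ : ∃ j, k = j + 1 := ⟨k - 1, by omega⟩
    -- both sides are reduced residues
    have hxmod : (pvStep^[k] (1, 3)).2
        = PySem.Int.mod ((pvStep^[j] ((1 : Int), (3 : Int))).2 + 2 * (pvStep^[j] ((1 : Int), (3 : Int))).1) 10007 := by
      rw [hj, Function.iterate_succ_apply']; rfl
    have hxb := pv_mod_bounds ((pvStep^[j] ((1 : Int), (3 : Int))).2 + 2 * (pvStep^[j] ((1 : Int), (3 : Int))).1)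
    have hyb := pv_mod_bounds ((pvMpow k).1 * 3 + (pvMpow k).2.1)
    -- and their images in ZMod 10007 agree
    apply pv_eq_of_cast_eq _ _ (hxmod ▸ hxb.1) (hxmod ▸ hxb.2) hyb.1 hyb.2
    have hA : (((pvStep^[k] (1, 3)).2 : Int) : ZMod 10007) = (pvZp k).2 :=
      congrArg Prod.snd (pv_cast_iter k)
    have hB : (((PySem.Int.mod ((pvMpow k).1 * 3 + (pvMpow k).2.1) 10007 : Int)) : ZMod 10007)
        = (pvZp k).2 := by
      rw [pv_cast_mod]
      push_cast
      have h1 := congrArg Prod.fst (pv_castM_mpow k)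
      have h2 := congrArg (fun A => A.2.1) (pv_castM_mpow k)
      simp only [pvCastM] at h1 h2
      rw [h1, h2]
      exact (pv_vec k).1
    rw [hA, hB]
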